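-- pv_equiv track=rewrite | github.com/gusseppe/sparkmach | sparkmach/bus_times.py | groupByPeriod
-- ===== SOURCE A (Python) =====
-- def groupByPeriod(x):
--     x=sorted(x)
--     tiemposRecorrido=[]
--
--     tsMinimo=x[0]
--     tsMaximo=x[0]
--     cMediana=1
--     periodoTs=[x[0]]
--     for i in range(0,len(x)-1):
--
--
--         if (x[i+1]-x[i] <= 120):
--
--             tsMaximo=x[i+1]
--             periodoTs.append(x[i+1])
--             cMediana+=1
--
--             if (i == len(x)-2):
--
--                 if (cMediana%2==0):
--                     medianaTs=(periodoTs[(cMediana//2)-1] + periodoTs[cMediana//2])//2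
--                 else:
--                     medianaTs= periodoTs[cMediana//2]
--
--                 tiemposRecorrido.append((medianaTs, tsMaximo-tsMinimo))
--
--
--         else:
--
--
--             if (cMediana%2==0):
--                 medianaTs=(periodoTs[(cMediana//2)-1] + periodoTs[cMediana//2])//2
--             else:
--                 medianaTs= periodoTs[cMediana//2]
--
--             tiemposRecorrido.append((medianaTs, tsMaximo-tsMinimo))
--             tsMinimo=x[i+1]
--             tsMaximo=x[i+1]
--             cMediana=1
--             periodoTs=[x[i+1]]
--
--             if (i == len(x)-2):
--                 tiemposRecorrido.append((tsMinimo, 0))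
--
--     #return x
--     return tiemposRecorrido
-- ===== SOURCE B (Python) =====
-- def groupByPeriod(x):
--     xs = sorted(x)
--     runs = []
--     cur = []
--     for v in xs:
--         if cur and v - cur[-1] <= 120:
--             cur.append(v)
--         else:
--             if cur:
--                 runs.append(cur)
--             cur = [v]
--     if cur:
--         runs.append(cur)
--     out = []
--     for run in runs:
--         n = len(run)
--         if n % 2 == 0:
--             med = (run[n // 2 - 1] + run[n // 2]) // 2
--         else:
--             med = run[n // 2]
--         out.append((med, run[-1] - run[0]))
--     return out
-- ===== Notes on version B (the rewrite author's own statement) =====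
-- stated objective: simpler
-- what changed: Replaces A's single index-based loop juggling five state variables (running min/max/counter/current-period and inline duplicated median code at two emission sites) by a plain two-pass decomposition: one pass builds the runs of gap<=120, a second pass maps each run to (median, last-first).
-- intended difference: On single-element lists A returns [] (its loop never runs, so the lone group is silently dropped, although trailing singleton runs elsewhere ARE emitted as (v,0)); B returns [(v,0)], the intended value for a one-timestamp period. — e.g. on groupByPeriod([5]): A returns [], B returns [(5, 0)]
import Mathlib
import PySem

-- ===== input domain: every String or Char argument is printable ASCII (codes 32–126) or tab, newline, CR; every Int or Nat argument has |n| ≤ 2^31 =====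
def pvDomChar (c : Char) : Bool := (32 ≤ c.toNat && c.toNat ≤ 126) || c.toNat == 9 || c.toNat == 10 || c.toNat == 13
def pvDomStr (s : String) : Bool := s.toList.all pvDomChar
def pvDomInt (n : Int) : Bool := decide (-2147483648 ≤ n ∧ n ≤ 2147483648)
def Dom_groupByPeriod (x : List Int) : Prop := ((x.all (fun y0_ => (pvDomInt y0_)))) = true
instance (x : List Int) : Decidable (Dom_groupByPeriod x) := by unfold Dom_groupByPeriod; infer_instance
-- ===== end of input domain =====

-- B replaces A's five-variable index loop (with the median code duplicated at two emission
-- sites) by a two-pass decomposition: build gap<=120 runs, then map each run to (median, span).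
-- Objective: simpler. A raises IndexError on [] (excluded by
-- Pre_; B happens to return [] there); on single-element lists A returns [] while B returns the intended [(v,0)] (see D_).

-- ===== PORT A =====
-- A's loop state: (tiemposRecorrido, tsMinimo, tsMaximo, cMediana, periodoTs)
def pvMedA (cMed : Int) (per : List Int) : Int :=
  if PySem.Int.mod cMed 2 = 0 then
    PySem.Int.floordiv
      ((PySem.List.pyGet? per (PySem.Int.floordiv cMed 2 - 1)).getD 0
        + (PySem.List.pyGet? per (PySem.Int.floordiv cMed 2)).getD 0) 2
  else
    (PySem.List.pyGet? per (PySem.Int.floordiv cMed 2)).getD 0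

def pvStepA (xs : List Int) (n : Int)
    (st : List (Int × Int) × Int × Int × Int × List Int) (i : Int) :
    List (Int × Int) × Int × Int × Int × List Int :=
  let tr := st.1
  let tsMin := st.2.1
  let tsMax := st.2.2.1
  let cMed := st.2.2.2.1
  let per := st.2.2.2.2
  let xi := (PySem.List.pyGet? xs i).getD 0
  let xi1 := (PySem.List.pyGet? xs (i + 1)).getD 0
  if xi1 - xi ≤ 120 then
    let tsMax := xi1
    let per := per ++ [xi1]
    let cMed := cMed + 1
    let tr := if i = n - 2 then tr ++ [(pvMedA cMed per, tsMax - tsMin)] else tr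
    (tr, tsMin, tsMax, cMed, per)
  else
    let tr := tr ++ [(pvMedA cMed per, tsMax - tsMin)]
    let tsMin := xi1
    let tsMax := xi1
    let cMed := 1
    let per := [xi1]
    let tr := if i = n - 2 then tr ++ [(tsMin, 0)] else tr
    (tr, tsMin, tsMax, cMed, per)

def groupByPeriod (x : List Int) : List (Int × Int) :=
  let xs := PySem.List.sorted x (fun v => v) false
  -- x[0]: IndexError on the empty list, excluded by Pre_groupByPeriod
  let x0 := (PySem.List.pyGet? xs 0).getD 0
  let n : Int := xs.length
  ((PySem.List.pyRange 0 (n - 1) 1).foldl (pvStepA xs n) ([], x0, x0, 1, [x0])).1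

-- ===== PORT B =====
def pvMedSpan (run : List Int) : Int × Int :=
  let n : Int := run.length
  let med :=
    if PySem.Int.mod n 2 = 0 then
      PySem.Int.floordiv
        ((PySem.List.pyGet? run (PySem.Int.floordiv n 2 - 1)).getD 0
          + (PySem.List.pyGet? run (PySem.Int.floordiv n 2)).getD 0) 2
    else
      (PySem.List.pyGet? run (PySem.Int.floordiv n 2)).getD 0
  (med, (PySem.List.pyGet? run (-1)).getD 0 - (PySem.List.pyGet? run 0).getD 0)

def pvStepB (st : List (List Int) × List Int) (v : Int) : List (List Int) × List Int :=
  let runs := st.1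
  let cur := st.2
  if !cur.isEmpty && decide (v - (PySem.List.pyGet? cur (-1)).getD 0 ≤ 120) then
    (runs, cur ++ [v])
  else
    ((if cur.isEmpty then runs else runs ++ [cur]), [v])

def groupByPeriod_alt (x : List Int) : List (Int × Int) :=
  let xs := PySem.List.sorted x (fun v => v) false
  let st := xs.foldl pvStepB ([], [])
  let runs := if st.2.isEmpty then st.1 else st.1 ++ [st.2]
  runs.map pvMedSpan

-- ===== PRECONDITION & SPEC =====
-- Pre_ excludes only the empty list, on which A raises IndexError at x[0].
def Pre_groupByPeriod (x : List Int) : Prop := x ≠ []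
instance (x : List Int) : Decidable (Pre_groupByPeriod x) := by unfold Pre_groupByPeriod; infer_instance
def pvWitness_groupByPeriod : List Int := [0, 50, 300]

-- On single-element lists A returns [] (its loop never runs so the lone group is silently
-- dropped, although trailing singleton runs elsewhere ARE emitted as (v,0)); B returns the
-- intended [(v,0)] for a one-timestamp period.
def D_groupByPeriod (x : List Int) : Prop := x.length = 1
instance (x : List Int) : Decidable (D_groupByPeriod x) := by unfold D_groupByPeriod; infer_instance

def Spec_groupByPeriod (x : List Int) (out : List (Int × Int)) : Prop :=
  ¬ D_groupByPeriod x → out = groupByPeriod_alt x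
instance (x : List Int) (out : List (Int × Int)) : Decidable (Spec_groupByPeriod x out) := by
  unfold Spec_groupByPeriod; infer_instance

def pvDiffWitness_groupByPeriod : List Int := [5]
def pvDiffWitnessOut_groupByPeriod : (List (Int × Int)) × (List (Int × Int)) := ([], [(5, 0)])

-- ===== CLAIM (what is proved, stated in full; the proofs are below) =====
def Claim_unchanged_groupByPeriod : Prop :=
  ∀ (x : List Int), Dom_groupByPeriod x → Pre_groupByPeriod x →
    Spec_groupByPeriod x (groupByPeriod x)
def Claim_changed_groupByPeriod : Prop :=
  Dom_groupByPeriod (pvDiffWitness_groupByPeriod) ∧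
  Pre_groupByPeriod (pvDiffWitness_groupByPeriod) ∧
  D_groupByPeriod (pvDiffWitness_groupByPeriod) ∧
  groupByPeriod (pvDiffWitness_groupByPeriod) = pvDiffWitnessOut_groupByPeriod.1 ∧
  groupByPeriod_alt (pvDiffWitness_groupByPeriod) = pvDiffWitnessOut_groupByPeriod.2 ∧
  pvDiffWitnessOut_groupByPeriod.1 ≠ pvDiffWitnessOut_groupByPeriod.2
def Claim_exact_groupByPeriod : Prop :=
  ∀ (x : List Int), Dom_groupByPeriod x → Pre_groupByPeriod x → D_groupByPeriod x →
    groupByPeriod x ≠ groupByPeriod_alt x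

-- ===== LEMMAS AND PROOFS =====

theorem pvStepB_runs_append (rest : List Int) :
    ∀ (runs : List (List Int)) (cur : List Int), cur ≠ [] →
    rest.foldl pvStepB (runs, cur)
      = (runs ++ (rest.foldl pvStepB ([], cur)).1, (rest.foldl pvStepB ([], cur)).2) := by
  induction rest with
  | nil => intro runs cur h; simp
  | cons v rest ih =>
    intro runs cur h
    simp only [List.foldl_cons]
    have hne : cur.isEmpty = false := by simpa [List.isEmpty_iff] using h
    by_cases hg : v - (PySem.List.pyGet? cur (-1)).getD 0 ≤ 120
    · have hs : ∀ rs, pvStepB (rs, cur) v = (rs, cur ++ [v]) := by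
        intro rs; simp [pvStepB, hne, hg]
      rw [hs, hs, ih runs (cur ++ [v]) (by simp)]
    · have hs : ∀ rs, pvStepB (rs, cur) v = (rs ++ [cur], [v]) := by
        intro rs; simp [pvStepB, hne, hg]
      rw [hs, hs, ih (runs ++ [cur]) [v] (by simp), ih ([] ++ [cur]) [v] (by simp)]
      simp

theorem pvStepB_cur_ne (rest : List Int) :
    ∀ (runs : List (List Int)) (cur : List Int), cur ≠ [] →
    (rest.foldl pvStepB (runs, cur)).2 ≠ [] := by
  induction rest with
  | nil => intro runs cur h; simpa using h
  | cons v rest ih =>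
    intro runs cur h
    simp only [List.foldl_cons]
    by_cases hg : (!cur.isEmpty && decide (v - (PySem.List.pyGet? cur (-1)).getD 0 ≤ 120)) = true
    · have hs : pvStepB (runs, cur) v = (runs, cur ++ [v]) := by
        simp only [pvStepB]; rw [if_pos (by simpa using hg)]
      rw [hs]; exact ih _ (cur ++ [v]) (by simp)
    · have hs : pvStepB (runs, cur) v = ((if cur.isEmpty then runs else runs ++ [cur]), [v]) := by
        simp only [pvStepB]; rw [if_neg (by simpa using hg)]
      rw [hs]; exact ih _ [v] (by simp)
def pvLoopA (tr : List (Int × Int)) (tsMin : Int) (per : List Int) (prev : Int)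
    (rest : List Int) : List (Int × Int) :=
  match rest with
  | [] => tr
  | v :: rest' =>
    if v - prev ≤ 120 then
      let per' := per ++ [v]
      let tr' := if rest' = [] then tr ++ [(pvMedA per'.length per', v - tsMin)] else tr
      pvLoopA tr' tsMin per' v rest'
    else
      let tr' := tr ++ [(pvMedA per.length per, prev - tsMin)]
      let tr'' := if rest' = [] then tr' ++ [(v, 0)] else tr'
      pvLoopA tr'' v [v] v rest'

theorem pvMedSpan_eq (per : List Int) (tsMin prev : Int)
    (_h : per ≠ []) (hh : per.head? = some tsMin) (hl : per.getLast? = some prev) :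
    pvMedSpan per = (pvMedA (per.length : Int) per, prev - tsMin) := by
  simp only [pvMedSpan, pvMedA]
  rw [PySem.List.pyGet?_neg_one, PySem.List.pyGet?_zero, hl]
  rw [← List.head?_eq_getElem?, hh]
  rfl

def pvFinishB (st : List (List Int) × List Int) : List (Int × Int) :=
  (if st.2.isEmpty then st.1 else st.1 ++ [st.2]).map pvMedSpan

theorem pvLoopA_eq_B (rest : List Int) :
    ∀ (tr : List (Int × Int)) (tsMin prev : Int) (per : List Int),
    per ≠ [] → per.head? = some tsMin → per.getLast? = some prev → rest ≠ [] →
    pvLoopA tr tsMin per prev rest = tr ++ pvFinishB (rest.foldl pvStepB ([], per)) := by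
  induction rest with
  | nil => intro _ _ _ _ _ _ _ hne; exact absurd rfl hne
  | cons v rest ih =>
    intro tr tsMin prev per hper hh hl _
    have hne : per.isEmpty = false := by simpa [List.isEmpty_iff] using hper
    simp only [List.foldl_cons]
    by_cases hg : v - prev ≤ 120
    · have hs : pvStepB ([], per) v = ([], per ++ [v]) := by
        simp only [pvStepB]
        rw [if_pos]
        simp [hne, PySem.List.pyGet?_neg_one, hl, hg]
      rw [hs]
      rcases eq_or_ne rest [] with hr | hr
      · subst hr
        have hm : pvMedSpan (per ++ [v]) = (pvMedA ((per ++ [v]).length : Int) (per ++ [v]), v - tsMin) := by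
          apply pvMedSpan_eq _ _ _ (by simp)
          · rw [List.head?_append_of_ne_nil _ hper]; exact hh
          · simp
        simp only [pvLoopA, if_pos hg, List.foldl_nil, pvFinishB]
        simp [hm]
      · simp only [pvLoopA, if_pos hg, if_neg hr]
        exact ih tr tsMin v (per ++ [v]) (by simp)
          (by rw [List.head?_append_of_ne_nil _ hper]; exact hh) (by simp) hr
    · have hs : pvStepB ([], per) v = ([per], [v]) := by
        simp only [pvStepB]
        rw [if_neg (by simp [hne, PySem.List.pyGet?_neg_one, hl]; omega),
            if_neg (by simp [hne])]
        simp
      rw [hs]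
      have hm := pvMedSpan_eq per tsMin prev hper hh hl
      rcases eq_or_ne rest [] with hr | hr
      · subst hr
        have hv : pvMedSpan [v] = (v, 0) := by
          simp [pvMedSpan, PySem.List.pyGet?_neg_one]
        simp only [pvLoopA, if_neg hg, List.foldl_nil, pvFinishB]
        simp [hm, hv]
      · simp only [pvLoopA, if_neg hg, if_neg hr]
        rw [ih (tr ++ [(pvMedA (per.length : Int) per, prev - tsMin)]) v v [v]
          (by simp) rfl rfl hr]
        rw [pvStepB_runs_append rest [per] [v] (by simp)]
        have hc := pvStepB_cur_ne rest [] [v] (by simp)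
        simp only [pvFinishB]
        rw [if_neg (by simpa [List.isEmpty_iff] using hc),
            if_neg (by simpa [List.isEmpty_iff] using hc)]
        simp [hm]
theorem pvStepA_bridge (rest : List Int) :
    ∀ (front : List Int) (prev tsMin : Int) (tr : List (Int × Int)) (per : List Int),
    ((PySem.List.pyRange (front.length : Int)
        (((front ++ prev :: rest).length : Int) - 1) 1).foldl
      (pvStepA (front ++ prev :: rest) ((front ++ prev :: rest).length))
      (tr, tsMin, prev, (per.length : Int), per)).1
    = pvLoopA tr tsMin per prev rest := by
  induction rest with
  | nil =>
    intro front prev tsMin tr per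
    rw [PySem.List.pyRange_one_eq_nil (by simp)]
    simp [pvLoopA]
  | cons v rest' ih =>
    intro front prev tsMin tr per
    have hcons : PySem.List.pyRange (front.length : Int)
        (((front ++ prev :: v :: rest').length : Int) - 1) 1
        = (front.length : Int) :: PySem.List.pyRange ((front.length : Int) + 1)
            (((front ++ prev :: v :: rest').length : Int) - 1) 1 :=
      PySem.List.pyRange_one_cons (by simp; omega)
    rw [hcons, List.foldl_cons]
    have hxi : PySem.List.pyGet? (front ++ prev :: v :: rest') (front.length : Int)
        = some prev := PySem.List.pyGet?_append_length front (v :: rest') prev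
    have hxi1 : PySem.List.pyGet? (front ++ prev :: v :: rest') ((front.length : Int) + 1)
        = some v := by
      have h1 : ((front.length : Int) + 1) = (((front ++ [prev]).length : Nat) : Int) := by
        simp
      rw [h1, show front ++ prev :: v :: rest' = (front ++ [prev]) ++ v :: rest' by simp]
      exact PySem.List.pyGet?_append_length (front ++ [prev]) rest' v
    have hcond : ((front.length : Int) = ((front ++ prev :: v :: rest').length : Int) - 2)
        ↔ rest' = [] := by
      rw [← List.length_eq_zero_iff]
      simp only [List.length_append, List.length_cons]
      push_cast
      omega
    have hstep2 : ∀ st, (PySem.List.pyRange ((front.length : Int) + 1)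
        (((front ++ prev :: v :: rest').length : Int) - 1) 1).foldl
        (pvStepA (front ++ prev :: v :: rest') ((front ++ prev :: v :: rest').length)) st
        = (PySem.List.pyRange (((front ++ [prev]).length : Nat) : Int)
            ((((front ++ [prev]) ++ v :: rest').length : Int) - 1) 1).foldl
          (pvStepA ((front ++ [prev]) ++ v :: rest') (((front ++ [prev]) ++ v :: rest').length)) st := by
      intro st
      congr 1 <;> simp
    have hl1 : (((per ++ [v]).length : Nat) : Int) = (per.length : Int) + 1 := by
      simp
    simp only [pvStepA, hxi, hxi1, Option.getD_some]
    by_cases hg : v - prev ≤ 120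
    · rw [if_pos hg]
      by_cases hr : rest' = []
      · rw [if_pos (hcond.mpr hr)]
        rw [hstep2]
        have h2 := ih (front ++ [prev]) v tsMin
          (tr ++ [(pvMedA ((per.length : Int) + 1) (per ++ [v]), v - tsMin)]) (per ++ [v])
        rw [hl1] at h2
        rw [h2]
        subst hr
        simp only [pvLoopA, if_pos hg, hl1]
        simp
      · rw [if_neg (fun h => hr (hcond.mp h))]
        rw [hstep2]
        have h2 := ih (front ++ [prev]) v tsMin tr (per ++ [v])
        rw [hl1] at h2
        rw [h2]
        simp only [pvLoopA, if_pos hg, if_neg hr, hl1]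
    · rw [if_neg hg]
      by_cases hr : rest' = []
      · rw [if_pos (hcond.mpr hr)]
        rw [hstep2]
        have h2 := ih (front ++ [prev]) v v
          (tr ++ [(pvMedA (per.length : Int) per, prev - tsMin)] ++ [(v, 0)]) [v]
        rw [show (([v] : List Int).length : Int) = 1 by simp] at h2
        rw [h2]
        subst hr
        simp only [pvLoopA, if_neg hg]
        simp
      · rw [if_neg (fun h => hr (hcond.mp h))]
        rw [hstep2]
        have h2 := ih (front ++ [prev]) v v
          (tr ++ [(pvMedA (per.length : Int) per, prev - tsMin)]) [v]
        rw [show (([v] : List Int).length : Int) = 1 by simp] at h2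
        rw [h2]
        simp only [pvLoopA, if_neg hg, if_neg hr]
theorem pv_main (x : List Int) (hpre : x ≠ []) (hD : x.length ≠ 1) :
    groupByPeriod x = groupByPeriod_alt x := by
  have hs : PySem.List.sorted x (fun v => v) false ≠ [] := by
    rw [Ne, PySem.List.sorted_eq_nil_iff]; exact hpre
  have hlen : (PySem.List.sorted x (fun v => v) false).length = x.length :=
    PySem.List.length_sorted x _ _
  rcases hxs : PySem.List.sorted x (fun v => v) false with _ | ⟨y0, rest⟩
  · exact absurd hxs hs
  · have hrest : rest ≠ [] := by
      intro h; subst h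
      rw [hxs] at hlen; simp at hlen; omega
    simp only [groupByPeriod, groupByPeriod_alt]
    rw [hxs]
    have hb := pvStepA_bridge rest [] y0 y0 [] [y0]
    simp only [List.nil_append, List.length_nil, List.length_cons, Nat.cast_zero] at hb
    norm_num at hb
    simp only [PySem.List.pyGet?_zero_cons, Option.getD_some, List.length_cons]
    push_cast
    norm_num
    rw [hb]
    rw [pvLoopA_eq_B rest [] y0 y0 [y0] (by simp) rfl rfl hrest]
    rw [show pvStepB ([], []) y0 = ([], [y0]) from rfl]
    simp [pvFinishB, List.isEmpty_iff]

theorem pv_tight_aux (x : List Int) (hD : x.length = 1) :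
    groupByPeriod x ≠ groupByPeriod_alt x := by
  have hlen : (PySem.List.sorted x (fun v => v) false).length = x.length :=
    PySem.List.length_sorted x _ _
  rw [hD] at hlen
  rcases List.length_eq_one_iff.mp hlen with ⟨y, hy⟩
  simp only [groupByPeriod, groupByPeriod_alt]
  rw [hy]
  rw [show ((([y] : List Int).length : Int) - 1) = 0 from by simp]
  rw [PySem.List.pyRange_one_eq_nil le_rfl]
  simp only [List.foldl_nil, List.foldl_cons]
  rw [show pvStepB ([], []) y = ([], [y]) from rfl]
  simp [pvMedSpan]

-- ===== VERDICT (by name: the statement is the Claim_ definition above) =====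
theorem groupByPeriod_spec : Claim_unchanged_groupByPeriod := by
  intro x _ hpre hD
  exact pv_main x hpre (fun h => hD h)

theorem groupByPeriod_changed : Claim_changed_groupByPeriod := by
  unfold Claim_changed_groupByPeriod; decide

theorem groupByPeriod_tight : Claim_exact_groupByPeriod := by
  intro x _ _ hD
  exact pv_tight_aux x hD
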